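-- pv_equiv track=rewrite | github.com/shuokabe/pyseg | analysis.py | token_count_utt
-- ===== SOURCE A (Python) =====
-- def token_count_utt(gold_boundary, segmented_boundary):
--     # Count the number of exactly matching tokens (at the boundary level)
--     # In one utterance.
--     token_match = True
--     n_token_match = 0
--     for i in range(len(gold_boundary)):
--         gold_bool = gold_boundary[i]
--         seg_bool = segmented_boundary[i]
--
--         if gold_bool and seg_bool: # Boundaries match
--             if token_match: # The current token is in both utterances
--                 n_token_match += 1
--             # Start a new token
--             token_match = True
--
--         # Boundaries don't match
--         elif (gold_bool and not seg_bool) or (not gold_bool and seg_bool):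
--             token_match = False
--         else: # Non-boundaries match: currently in a token
--             continue
--
--     if token_match: # Last token
--         n_token_match += 1
--     return n_token_match
-- ===== SOURCE B (Python) =====
-- def token_count_utt(gold_boundary, segmented_boundary):
--     # Partition positions at shared boundaries; count mismatch-free segments.
--     n = len(gold_boundary)
--     mism = [gold_boundary[i] != segmented_boundary[i] for i in range(n)]
--     cuts = [i for i in range(n) if gold_boundary[i] and segmented_boundary[i]]
--     starts = [0] + [c + 1 for c in cuts]
--     ends = cuts + [n]
--     return sum(1 for a, b in zip(starts, ends) if not any(mism[a:b]))
-- ===== Notes on version B (the rewrite author's own statement) =====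
-- stated objective: alternative
-- what changed: A's single online scan carrying a token-match flag and counter is replaced by a partition view: B builds the mismatch-flag list and the shared-boundary cut positions, then counts the cut-delimited slices containing no mismatch.
import Mathlib
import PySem

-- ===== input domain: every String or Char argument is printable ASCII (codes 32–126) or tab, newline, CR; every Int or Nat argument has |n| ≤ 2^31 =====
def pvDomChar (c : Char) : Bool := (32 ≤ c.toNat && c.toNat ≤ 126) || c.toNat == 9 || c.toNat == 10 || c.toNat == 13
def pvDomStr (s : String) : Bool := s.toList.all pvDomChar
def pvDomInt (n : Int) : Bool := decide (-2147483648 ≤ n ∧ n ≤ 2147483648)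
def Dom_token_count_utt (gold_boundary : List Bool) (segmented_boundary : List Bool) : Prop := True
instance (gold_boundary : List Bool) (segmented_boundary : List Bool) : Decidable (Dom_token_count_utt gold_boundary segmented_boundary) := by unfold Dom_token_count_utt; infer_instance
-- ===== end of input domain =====

-- B replaces A's online flag-and-counter scan by a partition view: collect the shared-boundary
-- cut positions and the per-position mismatch flags, then count the cut-delimited slices that
-- contain no mismatch (objective: alternative decomposition, same cost class).

-- ===== PORT A =====
def token_count_utt (gold_boundary : List Bool) (segmented_boundary : List Bool) : Int :=
  let r := (PySem.List.pyRange 0 gold_boundary.length 1).foldl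
    (fun (acc : Bool × Int) i =>
      let gold_bool := PySem.List.pyGetD gold_boundary i false
      let seg_bool := PySem.List.pyGetD segmented_boundary i false
      if gold_bool && seg_bool then
        (true, if acc.1 then acc.2 + 1 else acc.2)
      else if (gold_bool && !seg_bool) || (!gold_bool && seg_bool) then
        (false, acc.2)
      else
        acc)
    (true, 0)
  if r.1 then r.2 + 1 else r.2

-- ===== PORT B =====
def token_count_utt_alt (gold_boundary : List Bool) (segmented_boundary : List Bool) : Int :=
  let n : Int := gold_boundary.length
  let mism := (PySem.List.pyRange 0 n 1).map
    (fun i => PySem.List.pyGetD gold_boundary i false != PySem.List.pyGetD segmented_boundary i false)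
  let cuts := (PySem.List.pyRange 0 n 1).filter
    (fun i => PySem.List.pyGetD gold_boundary i false && PySem.List.pyGetD segmented_boundary i false)
  let starts := 0 :: cuts.map (· + 1)
  let ends := cuts ++ [n]
  (((starts.zip ends).filter
      (fun p => !(PySem.List.slice mism (some p.1) (some p.2)).any id)).length : Int)

-- ===== PRECONDITION & SPEC =====
-- Pre_ excludes exactly the inputs where Python A raises IndexError: a segmented list
-- shorter than the gold list (both programs index segmented_boundary by gold positions).
def Pre_token_count_utt (gold_boundary : List Bool) (segmented_boundary : List Bool) : Prop :=
  gold_boundary.length ≤ segmented_boundary.length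
instance (gold_boundary : List Bool) (segmented_boundary : List Bool) : Decidable (Pre_token_count_utt gold_boundary segmented_boundary) := by unfold Pre_token_count_utt; infer_instance
def pvWitness_token_count_utt : List Bool × List Bool := ([true, false, true], [true, true, true])

def Spec_token_count_utt (gold_boundary : List Bool) (segmented_boundary : List Bool) (out : Int) : Prop := out = token_count_utt_alt gold_boundary segmented_boundary
instance (gold_boundary : List Bool) (segmented_boundary : List Bool) (out : Int) : Decidable (Spec_token_count_utt gold_boundary segmented_boundary out) := by unfold Spec_token_count_utt; infer_instance

-- ===== CLAIM (what is proved, stated in full; the proofs are below) =====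
def Claim_equal_token_count_utt : Prop := ∀ (gold_boundary : List Bool) (segmented_boundary : List Bool), Dom_token_count_utt gold_boundary segmented_boundary → Pre_token_count_utt gold_boundary segmented_boundary → Spec_token_count_utt gold_boundary segmented_boundary (token_count_utt gold_boundary segmented_boundary)

-- ===== LEMMAS AND PROOFS =====

-- cut positions (both boundaries set) of the zipped boundary sequence, relative indices
def cutsNat : List (Bool × Bool) → List Nat
  | [] => []
  | p :: t => if p.1 && p.2 then 0 :: (cutsNat t).map (· + 1) else (cutsNat t).map (· + 1)

-- count of mismatch-free segments delimited by the cuts in C, current segment starting at a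
def countFrom (M : List Bool) : Nat → List Nat → Nat → Int
  | a, [], n => if ((M.drop a).take (n - a)).any id then 0 else 1
  | a, c :: C, n => (if ((M.drop a).take (c - a)).any id then 0 else 1) + countFrom M (c + 1) C n

-- like countFrom at a = 0, but the first segment only counts when the flag b is set
def countTok (b : Bool) (M : List Bool) (C : List Nat) (n : Nat) : Int :=
  match C with
  | [] => if b && !((M.take n).any id) then 1 else 0
  | c :: C => (if b && !((M.take c).any id) then 1 else 0) + countFrom M (c + 1) C n

-- index loop over the two parallel lists = fold over their zip (A's loop shape)
lemma bridge_fold {σ : Type} (G S : List Bool) (h : G.length ≤ S.length)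
    (f : σ → Bool → Bool → σ) :
    ∀ (j k : Nat), k + j = G.length → ∀ (init : σ),
      (PySem.List.pyRange (k : Int) (G.length : Int) 1).foldl
        (fun acc i => f acc (PySem.List.pyGetD G i false) (PySem.List.pyGetD S i false)) init
      = ((G.drop k).zip (S.drop k)).foldl (fun acc p => f acc p.1 p.2) init := by
  intro j
  induction j with
  | zero =>
      intro k hk init
      rw [PySem.List.pyRange_one_eq_nil (by omega)]
      rw [List.drop_eq_nil_of_le (by omega)]
      simp
  | succ j ih =>
      intro k hk init
      have hkG : k < G.length := by omega
      have hkS : k < S.length := by omega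
      rw [PySem.List.pyRange_one_cons (by exact_mod_cast hkG)]
      rw [List.drop_eq_getElem_cons hkG, List.drop_eq_getElem_cons hkS]
      simp only [List.foldl_cons, List.zip_cons_cons]
      rw [show ((k : Int) + 1) = ((k + 1 : Nat) : Int) by push_cast; ring]
      rw [ih (k + 1) (by omega)]
      simp [PySem.List.pyGetD_natCast, List.getD_eq_getElem?_getD,
        List.getElem?_eq_getElem hkG, List.getElem?_eq_getElem hkS]

-- the mism comprehension = map over the zip
lemma bridge_map (G S : List Bool) (h : G.length ≤ S.length) :
    ∀ (j k : Nat), k + j = G.length →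
      (PySem.List.pyRange (k : Int) (G.length : Int) 1).map
        (fun i => PySem.List.pyGetD G i false != PySem.List.pyGetD S i false)
      = ((G.drop k).zip (S.drop k)).map (fun p => p.1 != p.2) := by
  intro j
  induction j with
  | zero =>
      intro k hk
      rw [PySem.List.pyRange_one_eq_nil (by omega)]
      rw [List.drop_eq_nil_of_le (by omega)]
      simp
  | succ j ih =>
      intro k hk
      have hkG : k < G.length := by omega
      have hkS : k < S.length := by omega
      rw [PySem.List.pyRange_one_cons (by exact_mod_cast hkG)]
      rw [List.drop_eq_getElem_cons hkG, List.drop_eq_getElem_cons hkS]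
      simp only [List.map_cons, List.zip_cons_cons]
      rw [show ((k : Int) + 1) = ((k + 1 : Nat) : Int) by push_cast; ring]
      rw [ih (k + 1) (by omega)]
      simp [PySem.List.pyGetD_natCast, List.getD_eq_getElem?_getD,
        List.getElem?_eq_getElem hkG, List.getElem?_eq_getElem hkS]

-- the cuts comprehension = cast of the cut positions of the zip
lemma bridge_filter (G S : List Bool) (h : G.length ≤ S.length) :
    ∀ (j k : Nat), k + j = G.length →
      (PySem.List.pyRange (k : Int) (G.length : Int) 1).filter
        (fun i => PySem.List.pyGetD G i false && PySem.List.pyGetD S i false)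
      = (cutsNat ((G.drop k).zip (S.drop k))).map (fun m => ((k + m : Nat) : Int)) := by
  intro j
  induction j with
  | zero =>
      intro k hk
      rw [PySem.List.pyRange_one_eq_nil (by omega)]
      rw [List.drop_eq_nil_of_le (by omega)]
      simp [cutsNat]
  | succ j ih =>
      intro k hk
      have hkG : k < G.length := by omega
      have hkS : k < S.length := by omega
      rw [PySem.List.pyRange_one_cons (by exact_mod_cast hkG)]
      rw [List.drop_eq_getElem_cons hkG, List.drop_eq_getElem_cons hkS, List.zip_cons_cons]
      rw [List.filter_cons]
      have hcond : (PySem.List.pyGetD G (k : Int) false && PySem.List.pyGetD S (k : Int) false)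
          = (G[k] && S[k]) := by
        simp [PySem.List.pyGetD_natCast, List.getD_eq_getElem?_getD,
          List.getElem?_eq_getElem hkG, List.getElem?_eq_getElem hkS]
      rw [hcond]
      rw [show ((k : Int) + 1) = ((k + 1 : Nat) : Int) by push_cast; ring]
      rw [ih (k + 1) (by omega)]
      simp only [cutsNat]
      have hmap : ∀ (X : List Nat),
          (X.map (· + 1)).map (fun m => ((k + m : Nat) : Int))
            = X.map (fun m => ((k + 1 + m : Nat) : Int)) := by
        intro X
        rw [List.map_map]
        apply List.map_congr_left
        intro a _
        simp only [Function.comp_apply]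
        congr 1
        omega
      by_cases hg : (G[k] && S[k]) = true
      · rw [if_pos hg, if_pos (by simpa using hg), List.map_cons, hmap]
        norm_num
      · rw [if_neg hg, if_neg (by simpa using hg), hmap]

-- shifting a segment count past one consumed position
lemma countFrom_shift (m : Bool) (M : List Bool) :
    ∀ (C : List Nat) (a n : Nat),
      countFrom (m :: M) (a + 1) (C.map (· + 1)) (n + 1) = countFrom M a C n := by
  intro C
  induction C with
  | nil => intro a n; simp [countFrom, Nat.succ_sub_succ]
  | cons c C ih =>
      intro a n
      simp only [List.map_cons, countFrom, Nat.succ_sub_succ, List.drop_succ_cons]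
      rw [ih (c + 1) n]

lemma countTok_true (M : List Bool) (C : List Nat) (n : Nat) :
    countTok true M C n = countFrom M 0 C n := by
  cases C <;> simp [countTok, countFrom]

-- a matching non-boundary position extends the current segment with a clean flag
lemma countTok_skip (b : Bool) (M : List Bool) (C : List Nat) (n : Nat) :
    countTok b (false :: M) (C.map (· + 1)) (n + 1) = countTok b M C n := by
  cases C with
  | nil => simp [countTok]
  | cons c C =>
      simp only [List.map_cons, countTok, List.take_succ_cons, List.any_cons]
      rw [show (c + 1 + 1) = (c + 1) + 1 from rfl, countFrom_shift]
      simp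

-- a mismatching position spoils the current segment
lemma countTok_mismatch (b : Bool) (M : List Bool) (C : List Nat) (n : Nat) :
    countTok b (true :: M) (C.map (· + 1)) (n + 1) = countTok false M C n := by
  cases C with
  | nil => simp [countTok]
  | cons c C =>
      simp only [List.map_cons, countTok, List.take_succ_cons, List.any_cons]
      rw [show (c + 1 + 1) = (c + 1) + 1 from rfl, countFrom_shift]
      simp

-- a shared boundary closes the current segment (clean, since the flags agree there)
lemma countTok_cut (b : Bool) (M : List Bool) (C : List Nat) (n : Nat) :
    countTok b (false :: M) (0 :: C.map (· + 1)) (n + 1)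
      = (if b then 1 else 0) + countFrom M 0 C n := by
  simp only [countTok, List.take_zero, List.any_nil, Bool.not_false, Bool.and_true]
  rw [show (0 + 1 : Nat) = 0 + 1 from rfl, countFrom_shift]

-- A's per-pair step, named so the fold stays rigid during rewriting
def stepA (acc : Bool × Int) (p : Bool × Bool) : Bool × Int :=
  if p.1 && p.2 then (true, if acc.1 then acc.2 + 1 else acc.2)
  else if (p.1 && !p.2) || (!p.1 && p.2) then (false, acc.2)
  else acc

-- A's loop with arbitrary carried state equals the segment count with a first-segment flag
lemma masterA :
    ∀ (L : List (Bool × Bool)) (tm : Bool) (cnt : Int),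
      (if (L.foldl stepA (tm, cnt)).1 then (L.foldl stepA (tm, cnt)).2 + 1
        else (L.foldl stepA (tm, cnt)).2)
      = cnt + countTok tm (L.map (fun p => p.1 != p.2)) (cutsNat L) L.length := by
  intro L
  induction L with
  | nil =>
      intro tm cnt
      cases tm <;> simp [cutsNat, countTok]
  | cons p t ih =>
      intro tm cnt
      obtain ⟨g, s⟩ := p
      simp only [List.foldl_cons, List.map_cons, List.length_cons, cutsNat]
      cases g <;> cases s
      · rw [show stepA (tm, cnt) (false, false) = (tm, cnt) from rfl, ih tm cnt]
        norm_num
        rw [countTok_skip]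
      · rw [show stepA (tm, cnt) (false, true) = (false, cnt) from rfl, ih false cnt]
        norm_num
        rw [countTok_mismatch]
      · rw [show stepA (tm, cnt) (true, false) = (false, cnt) from rfl, ih false cnt]
        norm_num
        rw [countTok_mismatch]
      · rw [show stepA (tm, cnt) (true, true)
            = (true, if tm then cnt + 1 else cnt) from rfl,
          ih true (if tm then cnt + 1 else cnt)]
        norm_num
        rw [countTok_cut, countTok_true]
        cases tm <;> simp <;> ring

-- B's zip/filter/length expression equals countFrom
lemma zipCount (M : List Bool) :
    ∀ (C : List Nat) (a n : Nat),
      ((((((a : Nat) : Int) :: C.map (fun c => ((c : Nat) : Int) + 1)).zip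
            (C.map (fun c => ((c : Nat) : Int)) ++ [((n : Nat) : Int)])).filter
          (fun p => !(PySem.List.slice M (some p.1) (some p.2)).any id)).length : Int)
      = countFrom M a C n := by
  intro C
  induction C with
  | nil =>
      intro a n
      simp only [List.map_nil, List.zip_cons_cons, List.zip_nil_right, List.nil_append,
        List.filter_cons, List.filter_nil, PySem.List.slice_natCast, countFrom]
      by_cases h : ((M.drop a).take (n - a)).any id = true
      · simp [h]
      · simp [h]
  | cons c C ih =>
      intro a n
      simp only [List.map_cons, List.cons_append, List.zip_cons_cons, List.filter_cons]
      rw [show ((c : Int) + 1) = ((c + 1 : Nat) : Int) by push_cast; ring]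
      by_cases h : ((M.drop a).take (c - a)).any id = true
      · simp only [PySem.List.slice_natCast, h, Bool.not_true, Bool.false_eq_true, if_false]
        rw [ih (c + 1) n]
        simp [countFrom, h]
      · have hpred : (!((M.drop a).take (c - a)).any id) = true := by simp [h]
        simp only [PySem.List.slice_natCast, hpred]
        rw [if_pos trivial, List.length_cons, Nat.cast_add, Nat.cast_one]
        rw [ih (c + 1) n]
        simp [countFrom, h]
        ring

-- the A-side fold, written exactly as the port writes it, folded over the zip instead
lemma corA (G S : List Bool) (h : G.length ≤ S.length) :
    (PySem.List.pyRange 0 (G.length : Int) 1).foldl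
      (fun (acc : Bool × Int) i =>
        let gold_bool := PySem.List.pyGetD G i false
        let seg_bool := PySem.List.pyGetD S i false
        if gold_bool && seg_bool then
          (true, if acc.1 then acc.2 + 1 else acc.2)
        else if (gold_bool && !seg_bool) || (!gold_bool && seg_bool) then
          (false, acc.2)
        else
          acc)
      (true, 0)
    = (G.zip S).foldl stepA (true, 0) := by
  have hb := bridge_fold G S h
    (fun acc gb sb =>
      if gb && sb then (true, if acc.1 then acc.2 + 1 else acc.2)
      else if (gb && !sb) || (!gb && sb) then (false, acc.2)
      else acc)
    G.length 0 (by omega) ((true : Bool), (0 : Int))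
  simp only [Nat.cast_zero, List.drop_zero] at hb
  exact hb

lemma corMap (G S : List Bool) (h : G.length ≤ S.length) :
    (PySem.List.pyRange 0 (G.length : Int) 1).map
      (fun i => PySem.List.pyGetD G i false != PySem.List.pyGetD S i false)
    = (G.zip S).map (fun p => p.1 != p.2) := by
  have hb := bridge_map G S h G.length 0 (by omega)
  simp only [Nat.cast_zero, List.drop_zero] at hb
  exact hb

lemma corFilter (G S : List Bool) (h : G.length ≤ S.length) :
    (PySem.List.pyRange 0 (G.length : Int) 1).filter
      (fun i => PySem.List.pyGetD G i false && PySem.List.pyGetD S i false)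
    = (cutsNat (G.zip S)).map (fun m => ((m : Nat) : Int)) := by
  have hb := bridge_filter G S h G.length 0 (by omega)
  simp only [Nat.cast_zero, List.drop_zero, Nat.zero_add] at hb
  exact hb

lemma portA_eq (G S : List Bool) (h : G.length ≤ S.length) :
    token_count_utt G S
      = countFrom ((G.zip S).map (fun p => p.1 != p.2)) 0 (cutsNat (G.zip S)) (G.zip S).length := by
  simp only [token_count_utt]
  rw [corA G S h]
  rw [masterA (G.zip S) true 0, countTok_true]
  ring

lemma portB_eq (G S : List Bool) (h : G.length ≤ S.length) :
    token_count_utt_alt G S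
      = countFrom ((G.zip S).map (fun p => p.1 != p.2)) 0 (cutsNat (G.zip S)) G.length := by
  simp only [token_count_utt_alt]
  rw [corMap G S h, corFilter G S h]
  have hz := zipCount ((G.zip S).map (fun p => p.1 != p.2)) (cutsNat (G.zip S)) 0 G.length
  rw [← hz]
  norm_num [List.map_map, Function.comp_def]

-- ===== VERDICT (by name: the statement is the Claim_ definition above) =====
theorem token_count_utt_spec : Claim_equal_token_count_utt := by
  intro G S _ hpre
  unfold Spec_token_count_utt
  rw [portA_eq G S hpre, portB_eq G S hpre]
  rw [List.length_zip, Nat.min_eq_left hpre]
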